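-- pv_equiv track=rewrite | github.com/Symbolk/AlgInPy | searching/13robot-move-scope.py | movingCount1
-- ===== SOURCE A (Python) =====
-- def movingCount1(m: int, n: int, k: int) -> int:
--     def digitSum(a):
--         ans = 0
--         while a:
--             ans += a % 10
--             a //= 10
--         return ans
--
--     from queue import Queue
--     q = Queue()
--     q.put((0, 0))
--     reachable = set()
--
--     # right or down
--     move = [(1, 0), (0, 1)]
--
--     while not q.empty():
--         x, y = q.get()
--         if (x, y) not in reachable and 0 <= x < m and 0 <= y < n and digitSum(x) + digitSum(y) <= k:
--             reachable.add((x, y))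
--             # to next states
--             for dx, dy in move:
--                 q.put((x + dx, y + dy))
--
--     return len(reachable)
-- ===== SOURCE B (Python) =====
-- def movingCount1(m: int, n: int, k: int) -> int:
--     def digitSum(a):
--         ans = 0
--         while a:
--             ans += a % 10
--             a //= 10
--         return ans
--
--     if m <= 0 or n <= 0 or k < 0:
--         return 0
--
--     total = 0
--     x = 0
--     seeds = [0]            # columns reachable in the previous row (virtual entry: the origin)
--     while x < m and seeds:
--         dx = digitSum(x)
--         cur = []
--         last = -1          # rightmost column already placed in cur
--         for y in seeds:
--             if y > last:
--                 yy = y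
--                 while yy < n and dx + digitSum(yy) <= k:
--                     cur.append(yy)
--                     yy += 1
--                 if yy > y:
--                     last = yy - 1
--         total += len(cur)
--         seeds = cur
--         x += 1
--     return total
-- ===== Notes on version B (the rewrite author's own statement) =====
-- stated objective: faster
-- what changed: Replaces the FIFO-queue BFS with a visited set of cells by a row-by-row dynamic sweep that keeps only the previous row's reachable columns and grows runs of consecutive valid columns from them, counting cells as it goes (with an early exit once a row is empty or the grid/threshold is degenerate).
import Mathlib
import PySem

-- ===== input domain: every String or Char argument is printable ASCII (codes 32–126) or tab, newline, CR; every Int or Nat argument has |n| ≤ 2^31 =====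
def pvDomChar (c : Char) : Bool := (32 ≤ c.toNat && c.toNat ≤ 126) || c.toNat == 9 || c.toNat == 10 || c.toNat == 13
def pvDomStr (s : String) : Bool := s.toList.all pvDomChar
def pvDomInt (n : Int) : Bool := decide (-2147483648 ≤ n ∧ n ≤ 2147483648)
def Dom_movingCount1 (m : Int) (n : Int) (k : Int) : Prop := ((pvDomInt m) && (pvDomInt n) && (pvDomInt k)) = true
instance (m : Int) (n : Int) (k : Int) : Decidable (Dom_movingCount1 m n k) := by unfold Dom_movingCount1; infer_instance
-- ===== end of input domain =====

-- B replaces A's FIFO-queue BFS over single cells by a row-by-row sparse frontier sweep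
-- (runs of consecutive valid columns grown from the previous row's reachable columns);
-- same return value, different algorithm (objective: faster in practice on large grids).

-- ===== PORT A =====
-- digitSum: the inner helper of the Python (identical in A and in Source B, so defined once).
-- Python's `while a:` loops on a ≠ 0; both programs only call it with a ≥ 0 (on a < 0 the
-- Python helper would not terminate), so the loop guard is 0 < a.
def digitSum (a : Int) : Int :=
  if 0 < a then PySem.Int.mod a 10 + digitSum (PySem.Int.floordiv a 10) else 0
termination_by a.toNat
decreasing_by
  rw [PySem.Int.floordiv_eq_ediv_of_pos (by omega : (0:Int) < 10)]
  omega

-- The Python BFS loop. The fuel argument only makes the recursion structurally terminating;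
-- movingCount1 passes 3*m*n+1 fuel, which is proved sufficient below (bfs_post): the loop
-- always ends by emptying the queue, exactly like the Python `while not q.empty()`.
def bfsLoop (m n k : Int) : Nat → List (Int × Int) → PySem.Set (Int × Int) → PySem.Set (Int × Int)
  | 0, _, vis => vis
  | _ + 1, [], vis => vis
  | fuel + 1, (x, y) :: rest, vis =>
    if ¬ (x, y) ∈ vis ∧ 0 ≤ x ∧ x < m ∧ 0 ≤ y ∧ y < n ∧ digitSum x + digitSum y ≤ k then
      bfsLoop m n k fuel (rest ++ [(x + 1, y), (x, y + 1)]) (PySem.Set.add vis (x, y))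
    else
      bfsLoop m n k fuel rest vis

def movingCount1 (m : Int) (n : Int) (k : Int) : Int :=
  PySem.Set.len (bfsLoop m n k (3 * m.toNat * n.toNat + 1) [(0, 0)] PySem.Set.empty)

-- ===== PORT B =====
def extendRun (n k dx : Int) (yy : Int) (cur : List Int) : List Int × Int :=
  if yy < n ∧ dx + digitSum yy ≤ k then extendRun n k dx (yy + 1) (cur ++ [yy]) else (cur, yy)
termination_by (n - yy).toNat
decreasing_by omega

def rowLoop (n k dx : Int) : List Int → Int → List Int → List Int
  | [], _, cur => cur
  | y :: rest, last, cur =>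
    if last < y then
      rowLoop n k dx rest
        (if y < (extendRun n k dx y cur).2 then (extendRun n k dx y cur).2 - 1 else last)
        (extendRun n k dx y cur).1
    else
      rowLoop n k dx rest last cur

def outerLoop (m n k : Int) (x : Int) (seeds : List Int) (total : Int) : Int :=
  if x < m ∧ seeds ≠ [] then
    outerLoop m n k (x + 1) (rowLoop n k (digitSum x) seeds (-1) [])
      (total + (rowLoop n k (digitSum x) seeds (-1) []).length)
  else total
termination_by (m - x).toNat
decreasing_by omega

def movingCount1_alt (m : Int) (n : Int) (k : Int) : Int :=
  if m ≤ 0 ∨ n ≤ 0 ∨ k < 0 then 0 else outerLoop m n k 0 [0] 0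

-- ===== PRECONDITION & SPEC =====
def Spec_movingCount1 (m : Int) (n : Int) (k : Int) (out : Int) : Prop := out = movingCount1_alt m n k
instance (m : Int) (n : Int) (k : Int) (out : Int) : Decidable (Spec_movingCount1 m n k out) := by unfold Spec_movingCount1; infer_instance

-- ===== CLAIM (what is proved, stated in full; the proofs are below) =====
def Claim_equal_movingCount1 : Prop := ∀ (m : Int) (n : Int) (k : Int), Dom_movingCount1 m n k → Spec_movingCount1 m n k (movingCount1 m n k)

-- ===== LEMMAS AND PROOFS =====

theorem digitSum_nonneg (a : Int) : 0 ≤ digitSum a := by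
  fun_induction digitSum with
  | case1 a h ih =>
    have : 0 ≤ PySem.Int.mod a 10 := by
      rw [PySem.Int.mod_eq_emod_of_pos (by omega : (0:Int) < 10)]; omega
    omega
  | case2 => simp

def validCell (m n k x y : Int) : Prop :=
  0 ≤ x ∧ x < m ∧ 0 ≤ y ∧ y < n ∧ digitSum x + digitSum y ≤ k

def reach (m n k x y : Int) : Bool :=
  if 0 ≤ x ∧ x < m ∧ 0 ≤ y ∧ y < n ∧ digitSum x + digitSum y ≤ k then
    if x = 0 ∧ y = 0 then true
    else ((if 0 < x then reach m n k (x - 1) y else false) ||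
          (if 0 < y then reach m n k x (y - 1) else false))
  else false
termination_by (x + y).toNat
decreasing_by all_goals omega

theorem reach_iff (m n k x y : Int) :
    reach m n k x y = true ↔
      validCell m n k x y ∧
        ((x = 0 ∧ y = 0) ∨ (0 < x ∧ reach m n k (x - 1) y = true) ∨
          (0 < y ∧ reach m n k x (y - 1) = true)) := by
  constructor
  · intro h
    rw [reach] at h
    by_cases h1 : 0 ≤ x ∧ x < m ∧ 0 ≤ y ∧ y < n ∧ digitSum x + digitSum y ≤ k
    · rw [if_pos h1] at h
      refine ⟨h1, ?_⟩
      by_cases h2 : x = 0 ∧ y = 0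
      · exact Or.inl h2
      · rw [if_neg h2] at h
        simp only [Bool.or_eq_true] at h
        rcases h with h | h
        · by_cases h3 : 0 < x
          · rw [if_pos h3] at h; exact Or.inr (Or.inl ⟨h3, h⟩)
          · rw [if_neg h3] at h; exact absurd h (by simp)
        · by_cases h3 : 0 < y
          · rw [if_pos h3] at h; exact Or.inr (Or.inr ⟨h3, h⟩)
          · rw [if_neg h3] at h; exact absurd h (by simp)
    · rw [if_neg h1] at h; exact absurd h (by simp)
  · rintro ⟨hv, hcase⟩
    rw [reach, if_pos (show 0 ≤ x ∧ x < m ∧ 0 ≤ y ∧ y < n ∧ digitSum x + digitSum y ≤ k from hv)]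
    rcases hcase with ⟨rfl, rfl⟩ | ⟨hx, hr⟩ | ⟨hy, hr⟩
    · simp
    · have : ¬ (x = 0 ∧ y = 0) := by omega
      rw [if_neg this, if_pos hx, hr]; simp
    · have : ¬ (x = 0 ∧ y = 0) := by omega
      rw [if_neg this, if_pos hy, hr]; simp

theorem reach_valid {m n k x y : Int} (h : reach m n k x y = true) : validCell m n k x y :=
  ((reach_iff m n k x y).1 h).1

theorem reach_origin (m n k : Int) : reach m n k 0 0 = true ↔ validCell m n k 0 0 := by
  rw [reach_iff]; tauto

theorem reach_step_right {m n k x y : Int} (h : reach m n k x y = true)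
    (hv : validCell m n k (x + 1) y) : reach m n k (x + 1) y = true := by
  rw [reach_iff]
  have := reach_valid h
  unfold validCell at this
  exact ⟨hv, Or.inr (Or.inl ⟨by omega, by simpa using h⟩)⟩

theorem reach_step_down {m n k x y : Int} (h : reach m n k x y = true)
    (hv : validCell m n k x (y + 1)) : reach m n k x (y + 1) = true := by
  rw [reach_iff]
  have := reach_valid h
  unfold validCell at this
  exact ⟨hv, Or.inr (Or.inr ⟨by omega, by simpa using h⟩)⟩

-- a row with no reachable cell makes every later row empty
theorem row_empty_succ {m n k x : Int} (hx : 0 ≤ x)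
    (h : ∀ y, reach m n k x y = false) : ∀ y, reach m n k (x + 1) y = false := by
  intro y
  by_cases hy : 0 ≤ y
  · induction y, hy using Int.le_induction with
    | base =>
      rw [← Bool.not_eq_true, reach_iff]
      rintro ⟨hv, (⟨h1, -⟩ | ⟨-, h2⟩ | ⟨h3, -⟩)⟩
      · omega
      · simp only [add_sub_cancel_right] at h2; exact absurd h2 (by simp [h 0])
      · omega
    | succ y hy ih =>
      rw [← Bool.not_eq_true, reach_iff]
      rintro ⟨hv, (⟨h1, -⟩ | ⟨-, h2⟩ | ⟨-, h2⟩)⟩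
      · omega
      · simp only [add_sub_cancel_right] at h2; exact absurd h2 (by simp [h (y+1)])
      · simp only [add_sub_cancel_right] at h2; exact absurd h2 (by simp [ih])
  · rw [← Bool.not_eq_true, reach_iff]
    rintro ⟨hv, -⟩
    unfold validCell at hv; omega

def gridList (m n : Int) : List (Int × Int) :=
  (List.range m.toNat).flatMap (fun i : Nat => (List.range n.toNat).map (fun j : Nat => ((i : Int), (j : Int))))

theorem mem_gridList {m n : Int} {p : Int × Int} :
    p ∈ gridList m n ↔ 0 ≤ p.1 ∧ p.1 < m ∧ 0 ≤ p.2 ∧ p.2 < n := by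
  obtain ⟨a, b⟩ := p
  simp only [gridList, List.mem_flatMap, List.mem_map, Prod.mk.injEq]
  constructor
  · rintro ⟨i, hi, j, hj, rfl, rfl⟩
    simp only [List.mem_range] at hi hj
    omega
  · rintro ⟨ha, ha', hb, hb'⟩
    refine ⟨a.toNat, ?_, b.toNat, ?_, ?_, ?_⟩ <;> first | (simp only [List.mem_range]; omega) | omega

theorem length_gridList (m n : Int) : (gridList m n).length = m.toNat * n.toNat := by
  unfold gridList
  induction m.toNat with
  | zero => simp
  | succ t ih =>
    simp only [List.range_succ, List.flatMap_append, List.length_append, ih,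
      List.flatMap_cons, List.flatMap_nil, List.append_nil, List.length_map, List.length_range]
    ring

theorem nodup_gridList (m n : Int) : (gridList m n).Nodup := by
  refine List.nodup_flatMap.2 ⟨?_, ?_⟩
  · intro i _
    exact List.nodup_range.map (fun a b h => by
      have := congrArg Prod.snd h
      simpa using this)
  · refine List.pairwise_iff_forall_sublist.2 ?_
    intro a b hab
    have := (List.pairwise_lt_range).sublist hab
    have hlt : a < b := by
      cases this with
      | cons h' => exact h' b (by simp)
      | _ => simp_all
    intro p hp hq
    simp only [List.mem_map] at hp hq
    obtain ⟨j1, _, rfl⟩ := hp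
    obtain ⟨j2, _, h2⟩ := hq
    have := congrArg Prod.fst h2
    simp at this
    omega

theorem vis_length_le {m n k : Int} {vis : List (Int × Int)} (hn : vis.Nodup)
    (hv : ∀ p ∈ vis, validCell m n k p.1 p.2) : vis.length ≤ m.toNat * n.toNat := by
  have hsub : vis ⊆ gridList m n := by
    intro p hp
    have := hv p hp
    unfold validCell at this
    exact mem_gridList.2 ⟨this.1, this.2.1, this.2.2.1, this.2.2.2.1⟩
  calc vis.length ≤ (gridList m n).length := (hn.subperm hsub).length_le
    _ = m.toNat * n.toNat := length_gridList m n

def BfsInv (m n k : Int) (q vis : List (Int × Int)) : Prop :=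
  vis.Nodup ∧
  (∀ p ∈ vis, reach m n k p.1 p.2 = true) ∧
  (∀ p ∈ q, p = ((0 : Int), (0 : Int)) ∨ reach m n k (p.1 - 1) p.2 = true ∨
      reach m n k p.1 (p.2 - 1) = true) ∧
  (∀ p ∈ vis, (validCell m n k (p.1 + 1) p.2 → (p.1 + 1, p.2) ∈ vis ∨ (p.1 + 1, p.2) ∈ q) ∧
      (validCell m n k p.1 (p.2 + 1) → (p.1, p.2 + 1) ∈ vis ∨ (p.1, p.2 + 1) ∈ q)) ∧
  (validCell m n k 0 0 → ((0 : Int), (0 : Int)) ∈ vis ∨ ((0 : Int), (0 : Int)) ∈ q)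

def BfsPost (m n k : Int) (V : List (Int × Int)) : Prop :=
  V.Nodup ∧ (∀ p ∈ V, reach m n k p.1 p.2 = true) ∧
  (∀ p ∈ V, (validCell m n k (p.1 + 1) p.2 → (p.1 + 1, p.2) ∈ V) ∧
      (validCell m n k p.1 (p.2 + 1) → (p.1, p.2 + 1) ∈ V)) ∧
  (validCell m n k 0 0 → ((0 : Int), (0 : Int)) ∈ V)

theorem inv_post {m n k : Int} {vis : List (Int × Int)} (hI : BfsInv m n k [] vis) :
    BfsPost m n k vis := by
  obtain ⟨h1, h2, h3, h4, h5⟩ := hI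
  refine ⟨h1, h2, fun p hp => ?_, fun hv => ?_⟩
  · refine ⟨fun hv => ?_, fun hv => ?_⟩
    · rcases (h4 p hp).1 hv with h | h
      · exact h
      · simp at h
    · rcases (h4 p hp).2 hv with h | h
      · exact h
      · simp at h
  · rcases h5 hv with h | h
    · exact h
    · simp at h

theorem bfs_post (m n k : Int) :
    ∀ (fuel : Nat) (q vis : List (Int × Int)), BfsInv m n k q vis →
      3 * (m.toNat * n.toNat - vis.length) + q.length ≤ fuel →
      BfsPost m n k (bfsLoop m n k fuel q vis) := by
  intro fuel
  induction fuel with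
  | zero =>
    intro q vis hI hf
    have hq : q = [] := List.length_eq_zero_iff.1 (by omega)
    subst hq
    exact inv_post hI
  | succ fuel ih =>
    rintro (_ | ⟨⟨x, y⟩, rest⟩) vis hI hf
    · exact inv_post hI
    · obtain ⟨h1, h2, h3, h4, h5⟩ := hI
      rw [bfsLoop]
      by_cases hc : ¬ (x, y) ∈ vis ∧ 0 ≤ x ∧ x < m ∧ 0 ≤ y ∧ y < n ∧ digitSum x + digitSum y ≤ k
      · rw [if_pos hc]
        obtain ⟨hnm, hx0, hxm, hy0, hyn, hk⟩ := hc
        have hvalid : validCell m n k x y := ⟨hx0, hxm, hy0, hyn, hk⟩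
        have hreach : reach m n k x y = true := by
          rcases h3 (x, y) List.mem_cons_self with h | h | h
          · rw [Prod.mk.injEq] at h
            obtain ⟨rfl, rfl⟩ := h
            exact (reach_origin m n k).2 hvalid
          · have := reach_step_right h (by simpa using hvalid)
            simpa using this
          · have := reach_step_down h (by simpa using hvalid)
            simpa using this
        have hadd : PySem.Set.add vis (x, y) = vis ++ [(x, y)] :=
          PySem.Set.add_of_not_mem hnm
        rw [hadd]
        have h1' : (vis ++ [(x, y)]).Nodup := by
          rw [List.nodup_append_comm]
          exact List.nodup_cons.2 ⟨hnm, h1⟩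
        have h2' : ∀ p ∈ vis ++ [(x, y)], reach m n k p.1 p.2 = true := by
          intro p hp
          rcases List.mem_append.1 hp with h | h
          · exact h2 p h
          · simp only [List.mem_singleton] at h; subst h; exact hreach
        have hlen : (vis ++ [(x, y)]).length ≤ m.toNat * n.toNat :=
          vis_length_le h1' (fun p hp => reach_valid (h2' p hp))
        apply ih
        · refine ⟨h1', h2', ?_, ?_, ?_⟩
          · intro p hp
            rcases List.mem_append.1 hp with h | h
            · exact h3 p (List.mem_cons_of_mem _ h)
            · simp only [List.mem_cons, List.mem_singleton, List.not_mem_nil, or_false] at h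
              rcases h with rfl | rfl
              · refine Or.inr (Or.inl ?_)
                simpa using hreach
              · refine Or.inr (Or.inr ?_)
                simpa using hreach
          · intro p hp
            rcases List.mem_append.1 hp with hpv | hpx
            · refine ⟨fun hv => ?_, fun hv => ?_⟩
              · rcases (h4 p hpv).1 hv with h | h
                · exact Or.inl (List.mem_append_left _ h)
                · rcases List.mem_cons.1 h with h | h
                  · exact Or.inl (List.mem_append_right _ (by simp [h]))
                  · exact Or.inr (List.mem_append_left _ h)
              · rcases (h4 p hpv).2 hv with h | h
                · exact Or.inl (List.mem_append_left _ h)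
                · rcases List.mem_cons.1 h with h | h
                  · exact Or.inl (List.mem_append_right _ (by simp [h]))
                  · exact Or.inr (List.mem_append_left _ h)
            · simp only [List.mem_singleton] at hpx
              subst hpx
              exact ⟨fun _ => Or.inr (List.mem_append_right _ (by simp)),
                fun _ => Or.inr (List.mem_append_right _ (by simp))⟩
          · intro hv
            rcases h5 hv with h | h
            · exact Or.inl (List.mem_append_left _ h)
            · rcases List.mem_cons.1 h with h | h
              · exact Or.inl (List.mem_append_right _ (by simp [h]))
              · exact Or.inr (List.mem_append_left _ h)
        · have : (vis ++ [(x, y)]).length = vis.length + 1 := by simp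
          simp only [List.length_append, List.length_cons, List.length_singleton] at *
          omega
      · rw [if_neg hc]
        have hmem : validCell m n k x y → (x, y) ∈ vis := by
          intro hv
          obtain ⟨a1, a2, a3, a4, a5⟩ := hv
          by_contra hmm
          exact hc ⟨hmm, a1, a2, a3, a4, a5⟩
        apply ih
        · refine ⟨h1, h2, fun p hp => h3 p (List.mem_cons_of_mem _ hp), ?_, ?_⟩
          · intro p hp
            refine ⟨fun hv => ?_, fun hv => ?_⟩
            · rcases (h4 p hp).1 hv with h | h
              · exact Or.inl h
              · rcases List.mem_cons.1 h with h | h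
                · rw [Prod.mk.injEq] at h
                  obtain ⟨e1, e2⟩ := h
                  subst e1; subst e2
                  exact Or.inl (hmem hv)
                · exact Or.inr h
            · rcases (h4 p hp).2 hv with h | h
              · exact Or.inl h
              · rcases List.mem_cons.1 h with h | h
                · rw [Prod.mk.injEq] at h
                  obtain ⟨e1, e2⟩ := h
                  subst e1; subst e2
                  exact Or.inl (hmem hv)
                · exact Or.inr h
          · intro hv
            rcases h5 hv with h | h
            · exact Or.inl h
            · rcases List.mem_cons.1 h with h | h
              · rw [Prod.mk.injEq] at h
                obtain ⟨e1, e2⟩ := h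
                subst e1; subst e2
                exact Or.inl (hmem hv)
              · exact Or.inr h
        · simp only [List.length_cons] at hf
          omega

theorem post_reach_mem {m n k : Int} {V : List (Int × Int)} (hP : BfsPost m n k V) :
    ∀ x y : Int, reach m n k x y = true → (x, y) ∈ V := by
  suffices H : ∀ t : Nat, ∀ x y : Int, (x + y).toNat ≤ t → reach m n k x y = true → (x, y) ∈ V by
    exact fun x y h => H (x + y).toNat x y le_rfl h
  intro t
  induction t with
  | zero =>
    intro x y ht h
    have hv := reach_valid h
    obtain ⟨a1, a2, a3, a4, a5⟩ := hv
    have hx : x = 0 ∧ y = 0 := by omega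
    obtain ⟨rfl, rfl⟩ := hx
    exact hP.2.2.2 (reach_valid h)
  | succ t ih =>
    intro x y ht h
    have hv := reach_valid h
    obtain ⟨a1, a2, a3, a4, a5⟩ := hv
    have hcase := ((reach_iff m n k x y).1 h).2
    rcases hcase with ⟨e1, e2⟩ | ⟨hx, hr⟩ | ⟨hy, hr⟩
    · subst e1; subst e2
      exact hP.2.2.2 ⟨a1, a2, a3, a4, a5⟩
    · have hm : (x - 1, y) ∈ V := ih (x - 1) y (by omega) hr
      have := (hP.2.2.1 _ hm).1 (by
        show validCell m n k (x - 1 + 1) y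
        have : x - 1 + 1 = x := by omega
        rw [this]; exact ⟨a1, a2, a3, a4, a5⟩)
      simpa using this
    · have hm : (x, y - 1) ∈ V := ih x (y - 1) (by omega) hr
      have := (hP.2.2.1 _ hm).2 (by
        show validCell m n k x (y - 1 + 1)
        have : y - 1 + 1 = y := by omega
        rw [this]; exact ⟨a1, a2, a3, a4, a5⟩)
      simpa using this

theorem bfs_result (m n k : Int) :
    BfsPost m n k (bfsLoop m n k (3 * m.toNat * n.toNat + 1) [((0 : Int), (0 : Int))] PySem.Set.empty) := by
  apply bfs_post
  · refine ⟨List.nodup_nil, by simp, ?_, by simp, fun _ => Or.inr (by simp)⟩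
    intro p hp
    simp only [List.mem_singleton] at hp
    exact Or.inl hp
  · simp only [List.length_cons, List.length_nil]
    show 3 * (m.toNat * n.toNat - PySem.Set.empty.length) + 1 ≤ 3 * m.toNat * n.toNat + 1
    have h3 : 3 * (m.toNat * n.toNat) = 3 * m.toNat * n.toNat := by ring
    have : (PySem.Set.empty : List (Int × Int)).length = 0 := rfl
    omega

theorem mem_bfs_result (m n k : Int) (p : Int × Int) :
    p ∈ bfsLoop m n k (3 * m.toNat * n.toNat + 1) [((0 : Int), (0 : Int))] PySem.Set.empty ↔
      reach m n k p.1 p.2 = true := by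
  constructor
  · exact fun h => (bfs_result m n k).2.1 p h
  · intro h
    have := post_reach_mem (bfs_result m n k) p.1 p.2 h
    simpa using this

theorem movingCount1_eq_count (m n k : Int) :
    movingCount1 m n k =
      (((gridList m n).filter (fun p => reach m n k p.1 p.2)).length : Int) := by
  unfold movingCount1
  set V := bfsLoop m n k (3 * m.toNat * n.toNat + 1) [((0 : Int), (0 : Int))] PySem.Set.empty with hV
  have hnV : V.Nodup := (bfs_result m n k).1
  have hnF : ((gridList m n).filter (fun p => reach m n k p.1 p.2)).Nodup :=
    (nodup_gridList m n).filter _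
  have hsub1 : V ⊆ (gridList m n).filter (fun p => reach m n k p.1 p.2) := by
    intro p hp
    have hr : reach m n k p.1 p.2 = true := (mem_bfs_result m n k p).1 hp
    have hv := reach_valid hr
    obtain ⟨a1, a2, a3, a4, a5⟩ := hv
    exact List.mem_filter.2 ⟨mem_gridList.2 ⟨a1, a2, a3, a4⟩, hr⟩
  have hsub2 : (gridList m n).filter (fun p => reach m n k p.1 p.2) ⊆ V := by
    intro p hp
    exact (mem_bfs_result m n k p).2 (List.mem_filter.1 hp).2
  have hlen : V.length = ((gridList m n).filter (fun p => reach m n k p.1 p.2)).length :=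
    Nat.le_antisymm (hnV.subperm hsub1).length_le (hnF.subperm hsub2).length_le
  show PySem.Set.len V = _
  simp [PySem.Set.len, hlen]

def validCol (n k dx y : Int) : Prop := 0 ≤ y ∧ y < n ∧ dx + digitSum y ≤ k

def seg (a b : Int) : List Int := (List.range (b - a).toNat).map (fun i : Nat => a + (i : Int))

theorem mem_seg {a b z : Int} : z ∈ seg a b ↔ a ≤ z ∧ z < b := by
  simp only [seg, List.mem_map, List.mem_range]
  constructor
  · rintro ⟨i, hi, rfl⟩; omega
  · rintro ⟨h1, h2⟩; exact ⟨(z - a).toNat, by omega, by omega⟩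

theorem pairwise_seg (a b : Int) : (seg a b).Pairwise (· < ·) := by
  unfold seg
  exact List.pairwise_lt_range.map _ (fun i j h => by omega)

theorem seg_cons {a b : Int} (h : a < b) : seg a b = a :: seg (a + 1) b := by
  unfold seg
  have ht : (b - a).toNat = (b - (a + 1)).toNat + 1 := by omega
  rw [ht, List.range_succ_eq_map]
  simp only [List.map_cons, List.map_map, Nat.cast_zero, add_zero]
  congr 1
  apply List.map_congr_left
  intro i _
  simp only [Function.comp_apply]
  push_cast
  ring

theorem seg_self (a : Int) : seg a a = [] := by
  unfold seg
  simp

theorem extendRun_spec (n k dx : Int) : ∀ (y : Int) (cur : List Int),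
    y ≤ (extendRun n k dx y cur).2 ∧
    ¬ ((extendRun n k dx y cur).2 < n ∧ dx + digitSum (extendRun n k dx y cur).2 ≤ k) ∧
    (∀ w, y ≤ w → w < (extendRun n k dx y cur).2 → w < n ∧ dx + digitSum w ≤ k) ∧
    (extendRun n k dx y cur).1 = cur ++ seg y (extendRun n k dx y cur).2 := by
  intro y cur
  fun_induction extendRun n k dx y cur with
  | case1 yy cur hc ih =>
    obtain ⟨i1, i2, i3, i4⟩ := ih
    refine ⟨by omega, i2, ?_, ?_⟩
    · intro w hw1 hw2
      rcases eq_or_lt_of_le hw1 with rfl | hlt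
      · exact hc
      · exact i3 w (by omega) hw2
    · rw [i4]
      conv_rhs => rw [seg_cons (show yy < (extendRun n k dx (yy + 1) (cur ++ [yy])).2 by omega)]
      simp
  | case2 yy cur hc =>
    exact ⟨le_rfl, hc, fun w h1 h2 => by omega, by rw [seg_self]; simp⟩

def ClRow (n k dx : Int) (seeds : List Int) (z : Int) : Prop :=
  ∃ s ∈ seeds, s ≤ z ∧ ∀ w, s ≤ w → w ≤ z → validCol n k dx w

theorem mem_of_closed {n k dx : Int} {cur : List Int}
    (hcl : ∀ c ∈ cur, validCol n k dx (c + 1) → (c + 1) ∈ cur) :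
    ∀ (t : Nat) (a z : Int), a ∈ cur → a ≤ z → (z - a).toNat ≤ t →
      (∀ w, a ≤ w → w ≤ z → validCol n k dx w) → z ∈ cur := by
  intro t
  induction t with
  | zero =>
    intro a z ha hle ht _
    have : z = a := by omega
    rw [this]; exact ha
  | succ t ih =>
    intro a z ha hle ht hval
    rcases eq_or_lt_of_le hle with rfl | hlt
    · exact ha
    · have hz1 : z - 1 ∈ cur :=
        ih a (z - 1) ha (by omega) (by omega) (fun w h1 h2 => hval w h1 (by omega))
      have := hcl (z - 1) hz1 (by
        have : z - 1 + 1 = z := by omega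
        rw [this]
        exact hval z hle le_rfl)
      simpa using this

theorem rowLoop_spec (n k dx : Int) :
    ∀ (rem : List Int) (last : Int) (cur : List Int),
      cur.Pairwise (· < ·) →
      (∀ c ∈ cur, validCol n k dx c) →
      (∀ c ∈ cur, c ≤ last) →
      (∀ c ∈ cur, validCol n k dx (c + 1) → (c + 1) ∈ cur) →
      rem.Pairwise (· < ·) →
      (∀ s ∈ rem, 0 ≤ s) →
      (∀ s ∈ rem, s ≤ last → validCol n k dx s → s ∈ cur) →
      (rowLoop n k dx rem last cur).Pairwise (· < ·) ∧
      (∀ c ∈ rowLoop n k dx rem last cur, validCol n k dx c) ∧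
      (∀ c ∈ rowLoop n k dx rem last cur, validCol n k dx (c + 1) →
        (c + 1) ∈ rowLoop n k dx rem last cur) ∧
      (∀ z, z ∈ rowLoop n k dx rem last cur ↔ z ∈ cur ∨ ClRow n k dx rem z) := by
  intro rem
  induction rem with
  | nil =>
    intro last cur hp hv hl hcl _ _ _
    rw [rowLoop]
    exact ⟨hp, hv, hcl, fun z => by simp [ClRow]⟩
  | cons y rest ih =>
    intro last cur hp hv hl hcl hrp hr0 hskip
    have hy0 : 0 ≤ y := hr0 y List.mem_cons_self
    have hyrest : ∀ s ∈ rest, y < s := fun s hs => List.rel_of_pairwise_cons hrp hs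
    rw [rowLoop]
    by_cases hb : last < y
    · rw [if_pos hb]
      obtain ⟨e1, e2, e3, e4⟩ := extendRun_spec n k dx y cur
      set stop := (extendRun n k dx y cur).2 with hstop
      have hseg_valid : ∀ c ∈ seg y stop, validCol n k dx c := by
        intro c hc
        obtain ⟨hc1, hc2⟩ := mem_seg.1 hc
        obtain ⟨w1, w2⟩ := e3 c hc1 hc2
        exact ⟨by omega, w1, w2⟩
      have hcur' : (extendRun n k dx y cur).1 = cur ++ seg y stop := e4
      rw [hcur']
      have hstop_cases : y < stop ∨ stop = y := by omega
      have key := ih (if y < stop then stop - 1 else last) (cur ++ seg y stop)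
        (by
          rw [List.pairwise_append]
          refine ⟨hp, pairwise_seg y stop, ?_⟩
          intro c hc s hs
          have := hl c hc
          have := (mem_seg.1 hs).1
          omega)
        (by
          intro c hc
          rcases List.mem_append.1 hc with h | h
          · exact hv c h
          · exact hseg_valid c h)
        (by
          intro c hc
          rcases hstop_cases with hlt | heq
          · rw [if_pos hlt]
            rcases List.mem_append.1 hc with h | h
            · have := hl c h; omega
            · have := (mem_seg.1 h).2; omega
          · rw [heq, seg_self, List.append_nil] at hc
            rw [if_neg (by omega)]
            exact hl c hc)
        (by
          intro c hc hvc
          rcases List.mem_append.1 hc with h | h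
          · exact List.mem_append_left _ (hcl c h hvc)
          · obtain ⟨hc1, hc2⟩ := mem_seg.1 h
            rcases lt_or_eq_of_le (show c + 1 ≤ stop by omega) with hlt | heq
            · exact List.mem_append_right _ (mem_seg.2 ⟨by omega, hlt⟩)
            · exfalso
              exact e2 (by rw [← heq]; exact ⟨hvc.2.1, hvc.2.2⟩))
        (hrp.of_cons)
        (fun s hs => hr0 s (List.mem_cons_of_mem _ hs))
        (by
          intro s hs hsl hsv
          rcases hstop_cases with hlt | heq
          · rw [if_pos hlt] at hsl
            have := hyrest s hs
            exact List.mem_append_right _ (mem_seg.2 ⟨by omega, by omega⟩)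
          · rw [if_neg (by omega)] at hsl
            exact List.mem_append_left _ (hskip s (List.mem_cons_of_mem _ hs) hsl hsv))
      obtain ⟨k1, k2, k3, k4⟩ := key
      refine ⟨k1, k2, k3, ?_⟩
      intro z
      rw [k4]
      constructor
      · rintro (hz | hz)
        · rcases List.mem_append.1 hz with h | h
          · exact Or.inl h
          · obtain ⟨hz1, hz2⟩ := mem_seg.1 h
            refine Or.inr ⟨y, List.mem_cons_self, hz1, ?_⟩
            intro w hw1 hw2
            obtain ⟨w1, w2⟩ := e3 w hw1 (by omega)
            exact ⟨by omega, w1, w2⟩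
        · obtain ⟨s, hs, hs1, hs2⟩ := hz
          exact Or.inr ⟨s, List.mem_cons_of_mem _ hs, hs1, hs2⟩
      · rintro (hz | ⟨s, hs, hs1, hs2⟩)
        · exact Or.inl (List.mem_append_left _ hz)
        · rcases List.mem_cons.1 hs with rfl | hs'
          · refine Or.inl (List.mem_append_right _ (mem_seg.2 ⟨hs1, ?_⟩))
            by_contra hge
            push_neg at hge
            have := hs2 stop (by omega) (by omega)
            exact e2 ⟨this.2.1, this.2.2⟩
          · exact Or.inr ⟨s, hs', hs1, hs2⟩
    · rw [if_neg hb]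
      have key := ih last cur hp hv hl hcl hrp.of_cons
        (fun s hs => hr0 s (List.mem_cons_of_mem _ hs))
        (fun s hs hsl hsv => hskip s (List.mem_cons_of_mem _ hs) hsl hsv)
      obtain ⟨k1, k2, k3, k4⟩ := key
      refine ⟨k1, k2, k3, ?_⟩
      intro z
      rw [k4]
      constructor
      · rintro (hz | ⟨s, hs, hs1, hs2⟩)
        · exact Or.inl hz
        · exact Or.inr ⟨s, List.mem_cons_of_mem _ hs, hs1, hs2⟩
      · rintro (hz | ⟨s, hs, hs1, hs2⟩)
        · exact Or.inl hz
        · rcases List.mem_cons.1 hs with rfl | hs'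
          · refine Or.inl ?_
            have hyc : s ∈ cur := hskip s List.mem_cons_self (by omega) (hs2 s le_rfl hs1)
            exact mem_of_closed hcl (z - s).toNat s z hyc hs1 le_rfl hs2
          · exact Or.inr ⟨s, hs', hs1, hs2⟩

theorem validCol_cell {m n k x w : Int} (hx : 0 ≤ x) (hxm : x < m) :
    validCol n k (digitSum x) w ↔ validCell m n k x w := by
  unfold validCol validCell
  constructor
  · rintro ⟨a1, a2, a3⟩; exact ⟨hx, hxm, a1, a2, a3⟩
  · rintro ⟨_, _, a1, a2, a3⟩; exact ⟨a1, a2, a3⟩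

theorem reach_row (m n k x : Int) (hx : 0 ≤ x) (hxm : x < m) (seeds : List Int)
    (hseeds : ∀ y, y ∈ seeds ↔ ((x = 0 ∧ y = 0) ∨ (0 < x ∧ reach m n k (x - 1) y = true))) :
    ∀ z, reach m n k x z = true ↔ ClRow n k (digitSum x) seeds z := by
  have hs0 : ∀ s ∈ seeds, 0 ≤ s := by
    intro s hs
    rcases (hseeds s).1 hs with ⟨_, rfl⟩ | ⟨_, hr⟩
    · exact le_rfl
    · exact (reach_valid hr).2.2.1
  have H0 : ∀ z : Int, z ≤ 0 → (reach m n k x z = true ↔ ClRow n k (digitSum x) seeds z) := by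
    intro z hz
    rcases lt_or_eq_of_le hz with hneg | rfl
    · constructor
      · intro h; have := (reach_valid h).2.2.1; omega
      · rintro ⟨s, hs, hs1, hs2⟩
        have := (hs2 z (by omega) le_rfl).1; omega
    · constructor
      · intro h
        have hv := reach_valid h
        refine ⟨0, ?_, le_rfl, ?_⟩
        · rcases ((reach_iff m n k x 0).1 h).2 with ⟨hx0, _⟩ | ⟨hxp, hr⟩ | ⟨hyp, _⟩
          · exact (hseeds 0).2 (Or.inl ⟨hx0, rfl⟩)
          · exact (hseeds 0).2 (Or.inr ⟨hxp, hr⟩)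
          · omega
        · intro w h1 h2
          have hw : w = 0 := by omega
          rw [hw]
          exact (validCol_cell hx hxm).2 hv
      · rintro ⟨s, hs, hs1, hs2⟩
        have hs0' := hs0 s hs
        have hsz : s = 0 := by omega
        rw [hsz] at hs
        have hv : validCell m n k x 0 := (validCol_cell hx hxm).1 (hs2 0 (by omega) le_rfl)
        rw [reach_iff]
        rcases (hseeds 0).1 hs with ⟨hx0, _⟩ | ⟨hxp, hr⟩
        · exact ⟨hv, Or.inl ⟨hx0, rfl⟩⟩
        · exact ⟨hv, Or.inr (Or.inl ⟨hxp, hr⟩)⟩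
  suffices H : ∀ (t : Nat) (z : Int), z.toNat ≤ t →
      (reach m n k x z = true ↔ ClRow n k (digitSum x) seeds z) by
    exact fun z => H z.toNat z le_rfl
  intro t
  induction t with
  | zero => intro z ht; exact H0 z (by omega)
  | succ t ih =>
    intro z ht
    by_cases hz : z ≤ 0
    · exact H0 z hz
    · push_neg at hz
      constructor
      · intro h
        have hv := reach_valid h
        rcases ((reach_iff m n k x z).1 h).2 with ⟨_, hz0⟩ | ⟨hxp, hr⟩ | ⟨hzp, hr⟩
        · omega
        · exact ⟨z, (hseeds z).2 (Or.inr ⟨hxp, hr⟩), le_rfl,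
            fun w h1 h2 => by
              have : w = z := by omega
              rw [this]; exact (validCol_cell hx hxm).2 hv⟩
        · obtain ⟨s, hs, hs1, hs2⟩ := (ih (z - 1) (by omega)).1 hr
          refine ⟨s, hs, by omega, ?_⟩
          intro w h1 h2
          rcases lt_or_eq_of_le h2 with hlt | rfl
          · exact hs2 w h1 (by omega)
          · exact (validCol_cell hx hxm).2 hv
      · rintro ⟨s, hs, hs1, hs2⟩
        have hvz : validCell m n k x z := (validCol_cell hx hxm).1 (hs2 z hs1 le_rfl)
        rcases lt_or_eq_of_le hs1 with hlt | rfl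
        · have hprev : reach m n k x (z - 1) = true :=
            (ih (z - 1) (by omega)).2 ⟨s, hs, by omega, fun w h1 h2 => hs2 w h1 (by omega)⟩
          rw [reach_iff]
          exact ⟨hvz, Or.inr (Or.inr ⟨by omega, hprev⟩)⟩
        · rcases (hseeds s).1 hs with ⟨_, hz0⟩ | ⟨hxp, hr⟩
          · omega
          · rw [reach_iff]
            exact ⟨hvz, Or.inr (Or.inl ⟨hxp, hr⟩)⟩

def rowList (m n k : Int) (i : Nat) : List Int :=
  ((List.range n.toNat).map (fun j : Nat => (j : Int))).filter
    (fun z => reach m n k (i : Int) z)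

theorem nodup_rowList (m n k : Int) (i : Nat) : (rowList m n k i).Nodup := by
  unfold rowList
  exact (List.nodup_range.map (fun a b h => by exact_mod_cast h)).filter _

theorem mem_rowList {m n k : Int} {i : Nat} {z : Int} :
    z ∈ rowList m n k i ↔ 0 ≤ z ∧ z < n ∧ reach m n k (i : Int) z = true := by
  unfold rowList
  rw [List.mem_filter]
  simp only [List.mem_map, List.mem_range]
  constructor
  · rintro ⟨⟨j, hj, rfl⟩, hr⟩
    exact ⟨by omega, by omega, hr⟩
  · rintro ⟨h1, h2, hr⟩
    exact ⟨⟨z.toNat, by omega, by omega⟩, hr⟩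

theorem row_empty_ge {m n k x0 : Int} (hx : 0 ≤ x0)
    (h : ∀ y, reach m n k x0 y = false) :
    ∀ x', x0 ≤ x' → ∀ y, reach m n k x' y = false := by
  intro x' hle
  induction x', hle using Int.le_induction with
  | base => exact h
  | succ x' hx' ih => exact row_empty_succ (by omega) ih

theorem outer_spec (m n k : Int) :
    ∀ (t : Nat) (x : Int) (seeds : List Int) (total : Int),
      0 ≤ x → (m - x).toNat ≤ t →
      seeds.Pairwise (· < ·) →
      (∀ y, y ∈ seeds ↔ ((x = 0 ∧ y = 0) ∨ (0 < x ∧ reach m n k (x - 1) y = true))) →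
      outerLoop m n k x seeds total =
        total + ∑ i ∈ Finset.Ico x.toNat m.toNat, ((rowList m n k i).length : Int) := by
  intro t
  induction t with
  | zero =>
    intro x seeds total hx ht hsp hseeds
    have hxm : m ≤ x := by omega
    rw [outerLoop, if_neg (by omega)]
    have : Finset.Ico x.toNat m.toNat = ∅ := by
      apply Finset.Ico_eq_empty
      omega
    rw [this, Finset.sum_empty, add_zero]
  | succ t ih =>
    intro x seeds total hx ht hsp hseeds
    by_cases hc : x < m ∧ seeds ≠ []
    · obtain ⟨hxm, hne⟩ := hc
      rw [outerLoop, if_pos ⟨hxm, hne⟩]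
      have hs0 : ∀ s ∈ seeds, 0 ≤ s := by
        intro s hs
        rcases (hseeds s).1 hs with ⟨_, rfl⟩ | ⟨_, hr⟩
        · exact le_rfl
        · exact (reach_valid hr).2.2.1
      obtain ⟨k1, k2, k3, k4⟩ := rowLoop_spec n k (digitSum x) seeds (-1) []
        List.Pairwise.nil (by simp) (by simp) (by simp) hsp hs0
        (by intro s hs hsl hsv; have := hs0 s hs; omega)
      set R := rowLoop n k (digitSum x) seeds (-1) [] with hR
      have hmemR : ∀ z, z ∈ R ↔ reach m n k x z = true := by
        intro z
        rw [k4 z, reach_row m n k x hx hxm seeds hseeds z]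
        simp
      have hlenR : R.length = (rowList m n k x.toNat).length := by
        have hnR : R.Nodup := k1.imp (fun h => ne_of_lt h)
        have hnL : (rowList m n k x.toNat).Nodup := nodup_rowList m n k x.toNat
        have hxx : ((x.toNat : Int)) = x := by omega
        have hsub1 : R ⊆ rowList m n k x.toNat := by
          intro z hz
          have hr := (hmemR z).1 hz
          have hv := reach_valid hr
          rw [mem_rowList, hxx]
          exact ⟨hv.2.2.1, hv.2.2.2.1, hr⟩
        have hsub2 : rowList m n k x.toNat ⊆ R := by
          intro z hz
          rw [mem_rowList, hxx] at hz
          exact (hmemR z).2 hz.2.2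
        exact Nat.le_antisymm (hnR.subperm hsub1).length_le (hnL.subperm hsub2).length_le
      have hnext : ∀ y, y ∈ R ↔ ((x + 1 = 0 ∧ y = 0) ∨
          (0 < x + 1 ∧ reach m n k (x + 1 - 1) y = true)) := by
        intro y
        rw [hmemR y]
        constructor
        · intro h
          refine Or.inr ⟨by omega, ?_⟩
          have : x + 1 - 1 = x := by omega
          rw [this]; exact h
        · rintro (⟨h1, _⟩ | ⟨_, h2⟩)
          · omega
          · have : x + 1 - 1 = x := by omega
            rw [this] at h2; exact h2
      rw [ih (x + 1) R (total + R.length) (by omega) (by omega) k1 hnext]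
      have hsplit : ∑ i ∈ Finset.Ico x.toNat m.toNat, ((rowList m n k i).length : Int) =
          ((rowList m n k x.toNat).length : Int) +
            ∑ i ∈ Finset.Ico (x.toNat + 1) m.toNat, ((rowList m n k i).length : Int) :=
        Finset.sum_eq_sum_Ico_succ_bot (by omega) _
      have hx1 : (x + 1).toNat = x.toNat + 1 := by omega
      rw [hx1, hsplit, hlenR]
      ring
    · rw [outerLoop, if_neg hc]
      by_cases hxm : x < m
      · have hseeds_nil : seeds = [] := by tauto
        subst hseeds_nil
        have hx0 : 0 < x := by
          by_contra h0
          have hx00 : x = 0 := by omega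
          have := (hseeds 0).2 (Or.inl ⟨hx00, rfl⟩)
          simp at this
        have hempty : ∀ y, reach m n k (x - 1) y = false := by
          intro y
          by_contra hr
          simp only [Bool.not_eq_false] at hr
          have := (hseeds y).2 (Or.inr ⟨hx0, hr⟩)
          simp at this
        have hall : ∀ i ∈ Finset.Ico x.toNat m.toNat, ((rowList m n k i).length : Int) = 0 := by
          intro i hi
          simp only [Finset.mem_Ico] at hi
          have hge : x - 1 ≤ (i : Int) := by omega
          have hrow := row_empty_ge (by omega) hempty (i : Int) hge
          have : rowList m n k i = [] := by
            rw [List.eq_nil_iff_forall_not_mem]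
            intro z hz
            have := (mem_rowList.1 hz).2.2
            rw [hrow z] at this
            simp at this
          rw [this]
          simp
        rw [Finset.sum_congr rfl hall, Finset.sum_const_zero, add_zero]
      · have : Finset.Ico x.toNat m.toNat = ∅ := by
          apply Finset.Ico_eq_empty
          omega
        rw [this, Finset.sum_empty, add_zero]

theorem reach_false_of_degenerate {m n k : Int} (h : m ≤ 0 ∨ n ≤ 0 ∨ k < 0) :
    ∀ x z, reach m n k x z = false := by
  intro x z
  rw [← Bool.not_eq_true]
  intro hr
  obtain ⟨a1, a2, a3, a4, a5⟩ := reach_valid hr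
  have := digitSum_nonneg x
  have := digitSum_nonneg z
  rcases h with h | h | h <;> omega

theorem alt_eq_sum (m n k : Int) :
    movingCount1_alt m n k =
      ∑ i ∈ Finset.Ico 0 m.toNat, ((rowList m n k i).length : Int) := by
  unfold movingCount1_alt
  by_cases hd : m ≤ 0 ∨ n ≤ 0 ∨ k < 0
  · rw [if_pos hd]
    have hall : ∀ i ∈ Finset.Ico 0 m.toNat, ((rowList m n k i).length : Int) = 0 := by
      intro i _
      have : rowList m n k i = [] := by
        rw [List.eq_nil_iff_forall_not_mem]
        intro z hz
        have := (mem_rowList.1 hz).2.2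
        rw [reach_false_of_degenerate hd (i : Int) z] at this
        simp at this
      rw [this]; simp
    rw [Finset.sum_congr rfl hall, Finset.sum_const_zero]
  · rw [if_neg hd]
    push_neg at hd
    have h := outer_spec m n k (m - 0).toNat 0 [0] 0 le_rfl le_rfl
      (List.pairwise_singleton _ _)
      (by
        intro y
        simp only [List.mem_singleton]
        constructor
        · intro h
          subst h
          simp
        · rintro (⟨_, h⟩ | ⟨h1, _⟩)
          · exact h
          · omega)
    rw [h]
    simp

theorem count_eq_sum (m n k : Int) :
    (((gridList m n).filter (fun p => reach m n k p.1 p.2)).length : Int) =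
      ∑ i ∈ Finset.Ico 0 m.toNat, ((rowList m n k i).length : Int) := by
  rw [← Finset.range_eq_Ico]
  unfold gridList
  induction m.toNat with
  | zero => simp
  | succ t ih =>
    rw [List.range_succ, List.flatMap_append, List.filter_append, List.length_append,
      Finset.sum_range_succ, ← ih]
    have hrow : (((List.range n.toNat).map (fun j : Nat => ((t : Int), (j : Int)))).filter
        (fun p => reach m n k p.1 p.2)).length = (rowList m n k t).length := by
      rw [List.filter_map, List.length_map]
      unfold rowList
      rw [List.filter_map, List.length_map]
      rfl
    simp only [List.flatMap_cons, List.flatMap_nil, List.append_nil]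
    rw [hrow]
    push_cast
    ring

theorem movingCount1_eq_alt (m n k : Int) : movingCount1 m n k = movingCount1_alt m n k := by
  rw [movingCount1_eq_count, count_eq_sum, alt_eq_sum]

-- ===== VERDICT (by name: the statement is the Claim_ definition above) =====
theorem movingCount1_spec : Claim_equal_movingCount1 := by
  intro m n k _
  exact movingCount1_eq_alt m n k
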